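-- pv_equiv track=rewrite | github.com/miliar/Code_Jam_Webscraper | solutions_python/Problem_199/3181.py | unCoup
-- ===== SOURCE A (Python) =====
-- def unCoup (pancakes, flipper, longueur):
--
--     result = []
--     pancakes = list(pancakes)
--     nbrCombinaisons = longueur - flipper + 1
--
--     for combi in range (nbrCombinaisons):
--
--         combinaison = pancakes[:]
--
--         for flip in range (combi, combi+flipper):
--
--             if pancakes[flip] == '+':
--                 combinaison[flip] = '-'
--             else:
--                 combinaison[flip] = '+'
--
--
--         result.append(''.join(combinaison))
--
--     return result
-- ===== SOURCE B (Python) =====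
-- def unCoup(pancakes, flipper, longueur):
--     flipped = ''.join('-' if c == '+' else '+' for c in pancakes)
--     return [pancakes[:i] + flipped[i:i + flipper] + pancakes[i + flipper:]
--             for i in range(longueur - flipper + 1)]
-- ===== Notes on version B (the rewrite author's own statement) =====
-- stated objective: simpler
-- what changed: A copies the whole character list and re-toggles the window by index mutation for every window position; B precomputes the fully-toggled string once and builds each variant as a splice of three slices (unchanged prefix + toggled window + unchanged suffix). Pre_ excludes negative flipper, a window of negative width outside the task's domain, where A's unchanged copies and B's wrapped-slice strings are both accidents of their slice/loop mechanics, and inputs where a real window runs past the string's end, on which A raises IndexError.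
-- outside the precondition, e.g. on unCoup('+-', -1, 1): A returns ['+-', '+-', '+-'], B returns ['--', '++-', '+--']
import Mathlib
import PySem

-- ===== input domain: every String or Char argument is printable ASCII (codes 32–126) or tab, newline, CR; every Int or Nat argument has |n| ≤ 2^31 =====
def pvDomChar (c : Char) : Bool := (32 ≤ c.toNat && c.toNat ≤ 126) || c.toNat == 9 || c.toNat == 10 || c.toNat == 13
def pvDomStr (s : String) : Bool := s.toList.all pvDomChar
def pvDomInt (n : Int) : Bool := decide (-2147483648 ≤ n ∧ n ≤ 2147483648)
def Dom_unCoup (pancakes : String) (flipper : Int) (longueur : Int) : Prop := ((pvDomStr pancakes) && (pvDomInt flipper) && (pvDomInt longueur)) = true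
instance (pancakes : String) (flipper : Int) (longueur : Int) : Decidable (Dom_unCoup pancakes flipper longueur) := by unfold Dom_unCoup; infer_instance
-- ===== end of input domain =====

-- B replaces A's per-window copy-and-mutate toggle loop by one precomputed toggled string
-- and a splice of three slices per window position; same cost, simpler structure (objective: simpler).


-- ===== PORT A =====
-- literal port of A: for each combi, copy the char list and re-toggle the window in place
def unCoup (pancakes : String) (flipper : Int) (longueur : Int) : List String :=
  let pcs := pancakes.toList
  let nbrCombinaisons := longueur - flipper + 1
  (PySem.List.pyRange 0 nbrCombinaisons 1).foldl
    (fun result combi =>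
      let combinaison := (PySem.List.pyRange combi (combi + flipper) 1).foldl
        (fun comb flip =>
          if PySem.List.pyGet? pcs flip = some '+'
          then PySem.List.pySetD comb flip '-'
          else PySem.List.pySetD comb flip '+') pcs
      result ++ [String.ofList combinaison]) []

-- ===== PORT B =====
-- literal port of Source B: toggle once, then splice prefix + toggled window + suffix per position
def unCoup_alt (pancakes : String) (flipper : Int) (longueur : Int) : List String :=
  let flipped := pancakes.toList.map (fun c => if c = '+' then '-' else '+')
  (PySem.List.pyRange 0 (longueur - flipper + 1) 1).foldl
    (fun out i =>
      out ++ [String.ofList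
        (PySem.List.slice pancakes.toList none (some i)
          ++ PySem.List.slice flipped (some i) (some (i + flipper))
          ++ PySem.List.slice pancakes.toList (some (i + flipper)) none)]) []

-- ===== PRECONDITION & SPEC =====
-- Pre_ excludes (a) negative flipper, a window of negative width outside the task's domain, where
-- A's unchanged copies and B's wrapped-slice strings are both accidents of their loop/slice mechanics,
-- and (b) inputs where a real window (1 ≤ flipper ≤ longueur) runs past the string's end, on which A raises IndexError.
def Pre_unCoup (pancakes : String) (flipper : Int) (longueur : Int) : Prop :=
  0 ≤ flipper ∧ (flipper = 0 ∨ longueur < flipper ∨ longueur ≤ (pancakes.toList.length : Int))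
instance (pancakes : String) (flipper : Int) (longueur : Int) : Decidable (Pre_unCoup pancakes flipper longueur) := by unfold Pre_unCoup; infer_instance
def pvWitness_unCoup : String × Int × Int := ("+-+", 2, 3)
def Spec_unCoup (pancakes : String) (flipper : Int) (longueur : Int) (out : List String) : Prop := out = unCoup_alt pancakes flipper longueur
instance (pancakes : String) (flipper : Int) (longueur : Int) (out : List String) : Decidable (Spec_unCoup pancakes flipper longueur out) := by unfold Spec_unCoup; infer_instance

-- ===== CLAIM (what is proved, stated in full; the proofs are below) =====
def Claim_equal_unCoup : Prop := ∀ (pancakes : String) (flipper : Int) (longueur : Int), Dom_unCoup pancakes flipper longueur → Pre_unCoup pancakes flipper longueur → Spec_unCoup pancakes flipper longueur (unCoup pancakes flipper longueur)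

-- ===== LEMMAS AND PROOFS =====

-- the character A writes at index flip, read from the original list
def pvWrite (pcs : List Char) (flip : Int) : Char :=
  if PySem.List.pyGet? pcs flip = some '+' then '-' else '+'

-- A's inner loop = mapIdx selection (writes outside the list are no-ops of List.set)
lemma inner_fold_eq (pcs : List Char) (a b : Int) (ha : 0 ≤ a) (l : List Char)
    (hlen : l.length = pcs.length) :
    (PySem.List.pyRange a b 1).foldl
      (fun comb flip =>
        if PySem.List.pyGet? pcs flip = some '+'
        then PySem.List.pySetD comb flip '-'
        else PySem.List.pySetD comb flip '+') l
    = l.mapIdx (fun j c => if a ≤ (j : Int) ∧ (j : Int) < b then pvWrite pcs j else c) := by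
  by_cases hab : b ≤ a
  · rw [PySem.List.pyRange_one_eq_nil hab]
    simp only [List.foldl_nil]
    apply List.ext_getElem (by simp)
    intro i h1 h2
    rw [List.getElem_mapIdx]
    have : ¬ (a ≤ (i : Int) ∧ (i : Int) < b) := by omega
    simp [this]
  · rw [not_le] at hab
    rw [PySem.List.pyRange_one_cons hab]
    simp only [List.foldl_cons]
    have hstep : (if PySem.List.pyGet? pcs a = some '+'
        then PySem.List.pySetD l a '-' else PySem.List.pySetD l a '+')
        = l.set a.toNat (pvWrite pcs a) := by
      unfold pvWrite
      split_ifs with h <;> exact PySem.List.pySetD_of_nonneg _ _ ha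
    rw [hstep]
    have hlen' : (l.set a.toNat (pvWrite pcs a)).length = pcs.length := by
      simpa using hlen
    rw [inner_fold_eq pcs (a + 1) b (by omega) _ hlen']
    apply List.ext_getElem (by simp)
    intro i h1 h2
    rw [List.getElem_mapIdx, List.getElem_mapIdx, List.getElem_set]
    split_ifs <;> first | rfl | (exfalso; omega) | (congr 1; omega)
termination_by (b - a).toNat
decreasing_by omega

-- two mapIdx selections with equivalent index conditions agree
lemma mapIdx_cond_congr (p q : Nat → Prop) [DecidablePred p] [DecidablePred q]
    (t : Char → Char) (l : List Char) (h : ∀ j, j < l.length → (p j ↔ q j)) :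
    l.mapIdx (fun j c => if p j then t c else c)
    = l.mapIdx (fun j c => if q j then t c else c) := by
  apply List.ext_getElem (by simp)
  intro i h1 h2
  rw [List.getElem_mapIdx, List.getElem_mapIdx]
  have hiff := h i (by simpa using h1)
  by_cases hp : p i
  · rw [if_pos hp, if_pos (hiff.mp hp)]
  · rw [if_neg hp, if_neg (fun hq => hp (hiff.mpr hq))]

-- a mapIdx selection whose condition never holds is the identity
lemma mapIdx_if_false (p : Nat → Prop) [DecidablePred p] (t : Char → Char)
    (l : List Char) (h : ∀ j, ¬ p j) :
    l.mapIdx (fun j c => if p j then t c else c) = l := by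
  apply List.ext_getElem (by simp)
  intro i h1 h2
  rw [List.getElem_mapIdx, if_neg (h i)]

-- splice at position 0: toggled prefix of width w ++ untouched rest = mapIdx selection
lemma splice_zero (t : Char → Char) (l : List Char) (w : Nat) :
    (l.map t).take w ++ l.drop w
    = l.mapIdx (fun j c => if j < w then t c else c) := by
  induction l generalizing w with
  | nil => simp
  | cons c l ih =>
    cases w with
    | zero =>
      simp only [List.take_zero, List.drop_zero, List.nil_append]
      rw [mapIdx_if_false (fun j => j < 0) t (c :: l) (by omega)]
    | succ w =>
      simp only [List.map_cons, List.take_succ_cons, List.drop_succ_cons,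
        List.mapIdx_cons, List.cons_append]
      rw [ih w, if_pos (Nat.succ_pos w)]
      refine List.cons_eq_cons.mpr ⟨rfl, ?_⟩
      exact mapIdx_cond_congr _ _ t l (by omega)

-- B's splice (prefix ++ toggled window ++ suffix, Nat bounds) = mapIdx selection
lemma splice_eq (t : Char → Char) (l : List Char) (a w : Nat) :
    l.take a ++ ((l.map t).drop a).take w ++ l.drop (a + w)
    = l.mapIdx (fun j c => if a ≤ j ∧ j < a + w then t c else c) := by
  induction l generalizing a with
  | nil => simp
  | cons c l ih =>
    cases a with
    | zero =>
      simp only [List.take_zero, List.nil_append, List.drop_zero, Nat.zero_add]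
      rw [splice_zero t (c :: l) w]
      exact mapIdx_cond_congr _ _ t (c :: l) (by omega)
    | succ a =>
      simp only [List.take_succ_cons, List.map_cons, List.drop_succ_cons,
        List.mapIdx_cons, List.cons_append]
      have hna : Nat.succ a + w = (a + w) + 1 := by omega
      rw [hna, List.drop_succ_cons, ih a]
      refine List.cons_eq_cons.mpr ⟨(if_neg (by omega)).symm, ?_⟩
      exact mapIdx_cond_congr _ _ t l (by omega)

-- for j < pcs.length, pvWrite is the plain toggle of pcs[j]
lemma pvWrite_eq (pcs : List Char) (j : Nat) (hj : j < pcs.length) :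
    pvWrite pcs j = (if pcs[j] = '+' then '-' else '+') := by
  unfold pvWrite
  rw [PySem.List.pyGet?_natCast]
  simp [List.getElem?_eq_getElem hj]

-- ===== VERDICT (by name: the statement is the Claim_ definition above) =====
theorem unCoup_spec : Claim_equal_unCoup := by
  intro pancakes flipper longueur _ hpre
  obtain ⟨hf, _⟩ := hpre
  unfold Spec_unCoup unCoup unCoup_alt
  apply PySem.List.foldl_congr_mem
  intro acc combi hmem
  have hcombi : 0 ≤ combi := (PySem.List.mem_pyRange_one.mp hmem).1
  have key : (PySem.List.pyRange combi (combi + flipper) 1).foldl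
      (fun comb flip =>
        if PySem.List.pyGet? pancakes.toList flip = some '+'
        then PySem.List.pySetD comb flip '-'
        else PySem.List.pySetD comb flip '+') pancakes.toList
      = PySem.List.slice pancakes.toList none (some combi)
          ++ PySem.List.slice (pancakes.toList.map (fun c => if c = '+' then '-' else '+'))
              (some combi) (some (combi + flipper))
          ++ PySem.List.slice pancakes.toList (some (combi + flipper)) none := by
    rw [inner_fold_eq _ _ _ hcombi _ rfl,
        PySem.List.slice_to _ hcombi,
        PySem.List.slice_toNat _ hcombi (by omega),
        PySem.List.slice_from _ (by omega)]
    have e1 : (combi + flipper).toNat - combi.toNat = flipper.toNat := by omega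
    have e2 : (combi + flipper).toNat = combi.toNat + flipper.toNat := by omega
    rw [e1, e2, splice_eq (fun c => if c = '+' then '-' else '+') pancakes.toList
        combi.toNat flipper.toNat]
    apply List.ext_getElem (by simp)
    intro i hA hB
    rw [List.getElem_mapIdx, List.getElem_mapIdx]
    have hi : i < pancakes.toList.length := by simpa using hA
    rw [pvWrite_eq _ _ hi]
    by_cases hc : combi ≤ (i : Int) ∧ (i : Int) < combi + flipper
    · have hc' : combi.toNat ≤ i ∧ i < combi.toNat + flipper.toNat := by omega
      rw [if_pos hc, if_pos hc']
    · have hc' : ¬ (combi.toNat ≤ i ∧ i < combi.toNat + flipper.toNat) := by omega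
      rw [if_neg hc, if_neg hc']
  simp only [key]
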